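-- pv_equiv track=rewrite | github.com/khurrumsaleem/cyclus | cyclus/gentypesystem.py | split_template_args
-- ===== SOURCE A (Python) =====
-- def split_template_args(s, open_brace='<', close_brace='>', separator=','):
--     """Takes a string with template specialization and returns a list
--     of the argument values as strings. Mostly cribbed from xdress.
--     """
--     targs = []
--     ns = s.split(open_brace, 1)[-1].rsplit(close_brace, 1)[0].split(separator)
--     count = 0
--     targ_name = ''
--     for n in ns:
--         count += n.count(open_brace)
--         count -= n.count(close_brace)
--         if len(targ_name) > 0:
--             targ_name += separator
--         targ_name += n
--         if count == 0:
--             targs.append(targ_name.strip())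
--             targ_name = ''
--     return targs
-- ===== SOURCE B (Python) =====
-- def split_template_args(s, open_brace='<', close_brace='>', separator=','):
--     """Takes a string with template specialization and returns a list
--     of the argument values as strings."""
--     ns = s.split(open_brace, 1)[-1].rsplit(close_brace, 1)[0].split(separator)
--     cuts = []
--     depth = 0
--     for i, n in enumerate(ns):
--         depth += n.count(open_brace) - n.count(close_brace)
--         if depth == 0:
--             cuts.append(i + 1)
--     return [separator.join(ns[a:b]).strip() for a, b in zip([0] + cuts, cuts)]
-- ===== Notes on version B (the rewrite author's own statement) =====
-- stated objective: alternative
-- what changed: Instead of A's single loop that incrementally concatenates pieces into a string buffer (re-inserting the separator) and flushes it at depth zero, B's loop only records cut indices where the cumulative depth returns to zero and then builds each result by joining a slice of the piece list; Pre_ excludes delimiter arguments of length zero, on which both A and B raise ValueError in str.split.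
import Mathlib
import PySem

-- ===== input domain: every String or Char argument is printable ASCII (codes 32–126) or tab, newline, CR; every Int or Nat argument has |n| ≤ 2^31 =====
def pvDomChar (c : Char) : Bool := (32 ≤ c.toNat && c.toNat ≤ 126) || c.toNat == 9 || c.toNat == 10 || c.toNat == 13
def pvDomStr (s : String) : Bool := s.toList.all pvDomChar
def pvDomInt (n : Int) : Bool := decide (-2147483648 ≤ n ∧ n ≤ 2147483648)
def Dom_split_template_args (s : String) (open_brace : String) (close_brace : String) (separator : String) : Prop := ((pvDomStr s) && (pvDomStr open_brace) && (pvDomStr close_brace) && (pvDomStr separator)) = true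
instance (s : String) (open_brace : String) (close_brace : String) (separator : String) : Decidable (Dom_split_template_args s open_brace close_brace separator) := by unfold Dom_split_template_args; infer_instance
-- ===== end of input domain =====

-- B replaces A's incremental string-buffer accumulation by recording cut indices at depth zero
-- and joining list slices afterwards (different decomposition, same cost; return value only).

-- Shared first line of both Pythons:
-- s.split(open_brace, 1)[-1].rsplit(close_brace, 1)[0].split(separator)
def pvNs (s : String) (open_brace : String) (close_brace : String) (separator : String) : List (List Char) :=
  let sL := s.toList
  let head := (PySem.Chars.splitMax? sL open_brace.toList 1).getD [sL]  -- none only when open_brace = "", excluded by Pre_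
  let t := (PySem.List.pyGet? head (-1)).getD sL                        -- [-1]; split's result is never empty
  -- t.rsplit(close_brace, 1)[0] = the part before the LAST occurrence (t itself if absent); exact via rfind
  let i := PySem.Chars.rfind t close_brace.toList
  let t0 := if i = -1 then t else PySem.List.slice t none (some i)
  (PySem.Chars.split? t0 separator.toList).getD [t0]                    -- none only when separator = "", excluded by Pre_

-- ===== PORT A =====
def split_template_args (s : String) (open_brace : String) (close_brace : String) (separator : String) : List String :=
  let ns := pvNs s open_brace close_brace separator
  let r := ns.foldl (fun (st : Int × List Char × List String) n =>
      let c := st.1 + (PySem.Chars.count n open_brace.toList : Int) - (PySem.Chars.count n close_brace.toList : Int)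
      let tn := (if st.2.1.length > 0 then st.2.1 ++ separator.toList else st.2.1) ++ n
      if c = 0 then (c, ([] : List Char), st.2.2 ++ [String.ofList (PySem.Chars.strip tn)])
      else (c, tn, st.2.2)) ((0 : Int), ([] : List Char), ([] : List String))
  r.2.2

-- ===== PORT B =====
def split_template_args_alt (s : String) (open_brace : String) (close_brace : String) (separator : String) : List String :=
  let ns := pvNs s open_brace close_brace separator
  let r := (PySem.List.enumerate ns).foldl (fun (st : Int × List Int) p =>
      let d := st.1 + (PySem.Chars.count p.2 open_brace.toList : Int) - (PySem.Chars.count p.2 close_brace.toList : Int)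
      if d = 0 then (d, st.2 ++ [p.1 + 1]) else (d, st.2)) ((0 : Int), ([] : List Int))
  let cuts := r.2
  (List.zip ((0 : Int) :: cuts) cuts).map (fun p =>
      String.ofList (PySem.Chars.strip (PySem.Chars.join separator.toList (PySem.List.slice ns (some p.1) (some p.2)))))

-- ===== PRECONDITION & SPEC =====
-- A raises ValueError in str.split/rsplit when any of the three delimiter strings has length zero; excluded.
def Pre_split_template_args (s : String) (open_brace : String) (close_brace : String) (separator : String) : Prop :=
  open_brace ≠ "" ∧ close_brace ≠ "" ∧ separator ≠ ""
instance (s : String) (open_brace : String) (close_brace : String) (separator : String) : Decidable (Pre_split_template_args s open_brace close_brace separator) := by unfold Pre_split_template_args; infer_instance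

def pvWitness_split_template_args : String × String × String × String := ("Map<std::string, std::vector<int>>", "<", ">", ",")

def Spec_split_template_args (s : String) (open_brace : String) (close_brace : String) (separator : String) (out : List String) : Prop := out = split_template_args_alt s open_brace close_brace separator
instance (s : String) (open_brace : String) (close_brace : String) (separator : String) (out : List String) : Decidable (Spec_split_template_args s open_brace close_brace separator out) := by unfold Spec_split_template_args; infer_instance

-- ===== CLAIM (what is proved, stated in full; the proofs are below) =====
def Claim_equal_split_template_args : Prop := ∀ (s : String) (open_brace : String) (close_brace : String) (separator : String), Dom_split_template_args s open_brace close_brace separator → Pre_split_template_args s open_brace close_brace separator → Spec_split_template_args s open_brace close_brace separator (split_template_args s open_brace close_brace separator)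

-- ===== LEMMAS AND PROOFS =====

def pvDelta (opL clL : List Char) (c : Int) (n : List Char) : Int :=
  c + (PySem.Chars.count n opL : Int) - (PySem.Chars.count n clL : Int)
def pvGo (opL clL sepL : List Char) (c : Int) (g : List (List Char)) : List (List Char) → List (List Char)
  | [] => []
  | n :: rest =>
    if pvDelta opL clL c n = 0 then
      PySem.Chars.strip (PySem.Chars.join sepL (g ++ [n])) :: pvGo opL clL sepL 0 [] rest
    else pvGo opL clL sepL (pvDelta opL clL c n) (g ++ [n]) rest

theorem pv_count_nil (p : List Char) (hp : p ≠ []) : PySem.Chars.count ([] : List Char) p = 0 := by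
  cases p with
  | nil => exact absurd rfl hp
  | cons a t => simp [PySem.Chars.count]; rfl

theorem pv_join_snoc (sepL : List Char) (g : List (List Char)) (n : List Char) (hg : g ≠ []) :
    PySem.Chars.join sepL (g ++ [n]) = PySem.Chars.join sepL g ++ sepL ++ n := by
  induction g with
  | nil => exact absurd rfl hg
  | cons h t ih =>
    cases t with
    | nil => simp [PySem.Chars.join_singleton, PySem.Chars.join_cons_cons]
    | cons b t' =>
      have h2 := ih (by simp)
      simp only [List.cons_append] at h2 ⊢
      rw [PySem.Chars.join_cons_cons, h2, PySem.Chars.join_cons_cons]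
      simp

theorem pv_join_ne_nil (sepL h : List Char) (t : List (List Char)) (hh : h ≠ []) :
    PySem.Chars.join sepL (h :: t) ≠ [] := by
  cases t with
  | nil => simpa [PySem.Chars.join_singleton] using hh
  | cons b t' => simp [PySem.Chars.join_cons_cons, hh]

theorem pv_afold (opL clL sepL : List Char) (hop : opL ≠ []) (hcl : clL ≠ []) :
    ∀ (ns : List (List Char)) (c : Int) (g : List (List Char)) (name : List Char) (out : List String),
    name = PySem.Chars.join sepL g →
    (g ≠ [] → name ≠ []) →
    (g = [] → c = 0) →
    (g ≠ [] → ∃ h t, g = h :: t ∧ h ≠ []) →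
    (ns.foldl (fun (st : Int × List Char × List String) n =>
      let c := st.1 + (PySem.Chars.count n opL : Int) - (PySem.Chars.count n clL : Int)
      let tn := (if st.2.1.length > 0 then st.2.1 ++ sepL else st.2.1) ++ n
      if c = 0 then (c, ([] : List Char), st.2.2 ++ [String.ofList (PySem.Chars.strip tn)])
      else (c, tn, st.2.2)) (c, name, out)).2.2
    = out ++ (pvGo opL clL sepL c g ns).map String.ofList := by
  intro ns
  induction ns with
  | nil => intro c g name out h1 h2 h3 h4; simp [pvGo]
  | cons n rest ih =>
    intro c g name out h1 h2 h3 h4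
    have htn : (if name.length > 0 then name ++ sepL else name) ++ n
        = PySem.Chars.join sepL (g ++ [n]) := by
      cases g with
      | nil =>
        simp only [PySem.Chars.join_nil] at h1
        subst h1
        simp [PySem.Chars.join_singleton]
      | cons h t =>
        have hname : name ≠ [] := h2 (by simp)
        rw [if_pos (List.length_pos_of_ne_nil hname), pv_join_snoc sepL (h :: t) n (by simp), ← h1]
    simp only [List.foldl_cons, htn]
    by_cases hc : c + (PySem.Chars.count n opL : Int) - (PySem.Chars.count n clL : Int) = 0
    · rw [if_pos hc, hc]
      rw [ih 0 [] [] _ (by simp [PySem.Chars.join_nil]) (by simp) (fun _ => rfl) (by simp)]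
      rw [show pvGo opL clL sepL c g (n :: rest)
          = PySem.Chars.strip (PySem.Chars.join sepL (g ++ [n])) :: pvGo opL clL sepL 0 [] rest from by
        simp [pvGo, pvDelta, hc]]
      simp
    · rw [if_neg hc]
      have hnn : ∃ h t2, g ++ [n] = h :: t2 ∧ h ≠ [] := by
        cases g with
        | nil =>
          refine ⟨n, [], by simp, fun hn => hc ?_⟩
          subst hn
          rw [pv_count_nil opL hop, pv_count_nil clL hcl, h3 rfl]
          simp
        | cons h t =>
          obtain ⟨h2, t2, hg2, hh2⟩ := h4 (by simp)
          have e1 : h = h2 := by injection hg2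
          exact ⟨h, t ++ [n], by simp, e1 ▸ hh2⟩
      obtain ⟨h', t', hg', hh'⟩ := hnn
      rw [ih _ (g ++ [n]) _ _ rfl
        (fun _ => hg' ▸ pv_join_ne_nil sepL h' t' hh') (by simp) (fun _ => ⟨h', t', hg', hh'⟩)]
      rw [show pvGo opL clL sepL c g (n :: rest)
          = pvGo opL clL sepL (c + (PySem.Chars.count n opL : Int) - (PySem.Chars.count n clL : Int)) (g ++ [n]) rest from by
        simp [pvGo, pvDelta, hc]]

def pvCuts (opL clL : List Char) (c k : Int) : List (List Char) → List Int
  | [] => []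
  | n :: rest =>
    if pvDelta opL clL c n = 0 then (k + 1) :: pvCuts opL clL 0 (k + 1) rest
    else pvCuts opL clL (pvDelta opL clL c n) (k + 1) rest

theorem pv_bcuts (opL clL : List Char) :
    ∀ (ns : List (List Char)) (k : Int) (c : Int) (acc : List Int),
    ((PySem.List.enumerate ns k).foldl (fun (st : Int × List Int) p =>
      let d := st.1 + (PySem.Chars.count p.2 opL : Int) - (PySem.Chars.count p.2 clL : Int)
      if d = 0 then (d, st.2 ++ [p.1 + 1]) else (d, st.2)) (c, acc)).2
    = acc ++ pvCuts opL clL c k ns := by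
  intro ns
  induction ns with
  | nil => intro k c acc; simp [PySem.List.enumerate_nil, pvCuts]
  | cons n rest ih =>
    intro k c acc
    rw [PySem.List.enumerate_cons]
    simp only [List.foldl_cons]
    by_cases hc : c + (PySem.Chars.count n opL : Int) - (PySem.Chars.count n clL : Int) = 0
    · rw [if_pos hc, hc, ih (k + 1) 0 (acc ++ [k + 1])]
      simp [pvCuts, pvDelta, hc]
    · rw [if_neg hc, ih (k + 1) _ acc]
      simp [pvCuts, pvDelta, hc]

theorem pv_bgroups (opL clL sepL : List Char) :
    ∀ (rest g pre : List (List Char)) (c a k : Int),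
    a = (pre.length : Int) → k = a + (g.length : Int) →
    (List.zip (a :: pvCuts opL clL c k rest) (pvCuts opL clL c k rest)).map
      (fun p => String.ofList (PySem.Chars.strip (PySem.Chars.join sepL
        (PySem.List.slice (pre ++ g ++ rest) (some p.1) (some p.2)))))
    = (pvGo opL clL sepL c g rest).map String.ofList := by
  intro rest
  induction rest with
  | nil => intros; simp [pvCuts, pvGo]
  | cons n rest ih =>
    intro g pre c a k ha hk
    by_cases hc : pvDelta opL clL c n = 0
    · rw [show pvCuts opL clL c k (n :: rest) = (k + 1) :: pvCuts opL clL 0 (k + 1) rest from by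
        simp [pvCuts, hc]]
      rw [show pvGo opL clL sepL c g (n :: rest)
          = PySem.Chars.strip (PySem.Chars.join sepL (g ++ [n])) :: pvGo opL clL sepL 0 [] rest from by
        simp [pvGo, hc]]
      simp only [List.zip_cons_cons, List.map_cons]
      congr 1
      · have hk1 : k + 1 = ((pre.length + g.length + 1 : Nat) : Int) := by
          rw [hk, ha]; push_cast; ring
        rw [ha, hk1, show (pre.length : Int) = ((pre.length : Nat) : Int) from rfl,
          PySem.List.slice_natCast]
        rw [show pre ++ g ++ n :: rest = pre ++ ((g ++ [n]) ++ rest) by simp]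
        rw [List.drop_left, show pre.length + g.length + 1 - pre.length = (g ++ [n]).length by
          simp; omega]
        rw [List.take_left]
      · rw [show pre ++ g ++ n :: rest = (pre ++ g ++ [n]) ++ [] ++ rest by simp]
        exact ih [] (pre ++ g ++ [n]) 0 (k + 1) (k + 1)
          (by rw [hk, ha]; simp [List.length_append]; omega) (by simp)
    · rw [show pvCuts opL clL c k (n :: rest) = pvCuts opL clL (pvDelta opL clL c n) (k + 1) rest from by
        simp [pvCuts, hc]]
      rw [show pvGo opL clL sepL c g (n :: rest)
          = pvGo opL clL sepL (pvDelta opL clL c n) (g ++ [n]) rest from by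
        simp [pvGo, hc]]
      rw [show pre ++ g ++ n :: rest = pre ++ (g ++ [n]) ++ rest by simp]
      exact ih (g ++ [n]) pre (pvDelta opL clL c n) a (k + 1)
        ha (by rw [hk]; simp [List.length_append]; omega)

-- ===== VERDICT (by name: the statement is the Claim_ definition above) =====
theorem split_template_args_spec : Claim_equal_split_template_args := by
  intro s op cl sep _ hpre
  unfold Spec_split_template_args split_template_args split_template_args_alt
  obtain ⟨hop, hcl, hsep⟩ := hpre
  have hopL : op.toList ≠ [] := by simpa using hop
  have hclL : cl.toList ≠ [] := by simpa using hcl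
  simp only []
  rw [pv_afold op.toList cl.toList sep.toList hopL hclL (pvNs s op cl sep) 0 [] [] []
      (by simp [PySem.Chars.join_nil]) (by simp) (by simp) (by simp),
      pv_bcuts op.toList cl.toList (pvNs s op cl sep) 0 0 []]
  simpa using (pv_bgroups op.toList cl.toList sep.toList (pvNs s op cl sep) [] [] 0 0 0
      (by simp) (by simp)).symm
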